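-- pv_equiv track=rewrite | github.com/smutlak2021/python | group_sorted_integers.py | group_unique_sorted_integers
-- ===== SOURCE A (Python) =====
-- import collections
-- import bisect
--
-- def group_unique_sorted_integers(nums):
--     """
--     Groups a list of integers into sorted ascending sublists,
--     where each sublist contains unique items.
--
--     Each group starts with the smallest currently available number.
--     Subsequent numbers are added to a group if they are the smallest
--     available number STRICTLY GREATER than the last number added
--     to that group. Handles duplicate integers in the input by allowing
--     them to start or be part of different groups.
--
--     Args:
--         nums: A list of integers (may contain duplicates).
--
--     Returns:
--         A list of lists, where each inner list is a sorted group
--         containing unique items, formed according to the rules.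
--         Returns an empty list if the input is empty.
--     """
--     if not nums:
--         return []
--
--     # Use Counter to efficiently track the counts of available numbers
--     counts = collections.Counter(nums)
--
--     results = []
--
--     # Continue processing as long as there are numbers available
--     while counts:
--         current_group = []
--         last_added = -float('inf') # Initialize for comparison
--
--         # Find the absolute smallest number currently available to start the group
--         available_keys = sorted(counts.keys())
--         if not available_keys: # Safety check if counts became empty unexpectedly
--              break
--
--         start_num = available_keys[0] # The smallest available key starts the group
--
--         current_group.append(start_num)
--         counts[start_num] -= 1
--         if counts[start_num] == 0:
--             del counts[start_num] # Remove number if its count drops to zero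
--         last_added = start_num
--
--         # Greedily extend the current group with unique items
--         while True:
--             next_num_candidate = None
--             found_candidate = False
--
--             # Get currently available keys sorted
--             current_available_keys = sorted(counts.keys())
--
--             # --- Modification for Uniqueness ---
--             # We need the smallest available key that is STRICTLY GREATER than last_added.
--             # bisect_right finds the insertion point AFTER any existing last_added values.
--             search_start_idx = bisect.bisect_right(current_available_keys, last_added)
--
--             # Iterate through available keys starting from this index
--             for i in range(search_start_idx, len(current_available_keys)):
--                 num = current_available_keys[i]
--                 # num > last_added is guaranteed by bisect_right and loop start index
--                 if counts[num] > 0: # Check if we actually have any left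
--                     next_num_candidate = num
--                     found_candidate = True
--                     break # Found the smallest available > last_added
--
--             if found_candidate:
--                 # Add the found number (guaranteed unique in this group)
--                 current_group.append(next_num_candidate)
--                 counts[next_num_candidate] -= 1
--                 if counts[next_num_candidate] == 0:
--                     del counts[next_num_candidate]
--                 last_added = next_num_candidate # Update last_added for the next iteration
--             else:
--                 # No suitable number (> last_added) found to extend the current group
--                 break # Exit the inner while loop
--
--         # Add the completed group (with unique elements) to the results
--         results.append(current_group)
--         # return current_group
--
--     return results
-- ===== SOURCE B (Python) =====
-- import collections
--
--
-- def group_unique_sorted_integers(nums):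
--     """Same grouping computed directly: group g (0-based) consists of the
--     distinct values whose multiplicity exceeds g, in ascending order."""
--     counts = collections.Counter(nums)
--     vals = sorted(counts)
--     width = max(counts.values(), default=0)
--     return [[v for v in vals if counts[v] > g] for g in range(width)]
-- ===== Notes on version B (the rewrite author's own statement) =====
-- stated objective: faster
-- what changed: Replaces the outer while-loop that re-sorts the remaining keys and bisects on every extension with a single count+sort: group g is exactly the ascending distinct values whose multiplicity exceeds g, built directly by one comprehension per group.
import Mathlib
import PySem

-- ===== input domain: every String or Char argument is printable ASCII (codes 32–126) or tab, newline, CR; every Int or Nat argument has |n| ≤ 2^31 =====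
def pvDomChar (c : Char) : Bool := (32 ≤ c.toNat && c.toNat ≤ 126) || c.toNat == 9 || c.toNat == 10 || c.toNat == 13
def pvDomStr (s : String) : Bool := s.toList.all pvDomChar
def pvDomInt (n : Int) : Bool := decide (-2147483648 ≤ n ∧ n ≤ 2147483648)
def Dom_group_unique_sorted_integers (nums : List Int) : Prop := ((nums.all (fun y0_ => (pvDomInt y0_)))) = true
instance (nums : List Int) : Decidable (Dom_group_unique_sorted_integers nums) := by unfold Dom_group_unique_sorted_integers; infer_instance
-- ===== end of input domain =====

-- B replaces A's repeated sort-and-scan greedy loop by one count plus one sort: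
-- group g is the ascending list of distinct values whose multiplicity exceeds g (objective: faster).

-- ===== PORT A =====
-- 'for i in range(search_start_idx, len(current_available_keys)): num = keys[i]; if counts[num] > 0: … break'
def pvFindCand (counts : PySem.Dict Int Int) : List Int → Option Int
  | [] => none
  | k :: rest => if counts.getD k 0 > 0 then some k else pvFindCand counts rest

-- 'counts[k] -= 1'  followed by  'if counts[k] == 0: del counts[k]'
def pvDec (counts : PySem.Dict Int Int) (k : Int) : PySem.Dict Int Int :=
  let c := counts.modify k 0 (· - 1)
  if c.getD k 0 == 0 then c.erase k else c

-- the inner 'while True' extension loop; the fuel only makes the recursion structural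
-- (the proof shows any fuel ≥ the number of remaining keys above `last` suffices)
def pvInnerA (fuel : Nat) (counts : PySem.Dict Int Int) (group : List Int) (last : Int) :
    List Int × PySem.Dict Int Int :=
  match fuel with
  | 0 => (group, counts)
  | fuel + 1 =>
    let ckeys := PySem.List.sorted counts.keys (fun x => x) false
    let idx := PySem.List.bisectRight ckeys last
    match pvFindCand counts (ckeys.drop idx) with
    | none => (group, counts)
    | some num => pvInnerA fuel (pvDec counts num) (group ++ [num]) num

-- the outer 'while counts:' loop; ifuel is handed to the inner loop, fuel makes this loop structural
def pvOuterA (ifuel : Nat) : Nat → PySem.Dict Int Int → List (List Int) → List (List Int)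
  | 0, _, results => results
  | fuel + 1, counts, results =>
    if counts.size == 0 then results
    else
      match PySem.List.sorted counts.keys (fun x => x) false with
      | [] => results        -- 'if not available_keys: break'
      | start :: _ =>
        let r := pvInnerA ifuel (pvDec counts start) [start] start
        pvOuterA ifuel fuel r.2 (results ++ [r.1])

def group_unique_sorted_integers (nums : List Int) : List (List Int) :=
  if nums.isEmpty then []
  else pvOuterA nums.length (nums.length + 1) (PySem.Dict.counter nums) []

-- ===== PORT B =====
def group_unique_sorted_integers_alt (nums : List Int) : List (List Int) :=
  let counts := PySem.Dict.counter nums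
  let vals := PySem.List.sorted counts.keys (fun x => x) false
  let width := PySem.List.maxD counts.values (fun x => x) 0
  (PySem.List.pyRange 0 width 1).map (fun g => vals.filter (fun v => decide (g < counts.getD v 0)))

-- ===== PRECONDITION & SPEC =====
def Spec_group_unique_sorted_integers (nums : List Int) (out : List (List Int)) : Prop := out = group_unique_sorted_integers_alt nums
instance (nums : List Int) (out : List (List Int)) : Decidable (Spec_group_unique_sorted_integers nums out) := by unfold Spec_group_unique_sorted_integers; infer_instance

-- ===== CLAIM (what is proved, stated in full; the proofs are below) =====
def Claim_equal_group_unique_sorted_integers : Prop := ∀ (nums : List Int), Dom_group_unique_sorted_integers nums → Spec_group_unique_sorted_integers nums (group_unique_sorted_integers nums)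

-- ===== LEMMAS AND PROOFS =====

-- sorted key list of a dict and the invariant A's loops maintain on the counter
def pvSKeys (d : PySem.Dict Int Int) : List Int :=
  PySem.List.sorted d.keys (fun x => x) false

def pvDInv (d : PySem.Dict Int Int) : Prop :=
  d.keys.Nodup ∧ ∀ j : Int, (j ∈ d.keys ↔ 0 < d.getD j 0)

theorem pvDInv_getD_nonneg {d : PySem.Dict Int Int} (h : pvDInv d) (j : Int) :
    0 ≤ d.getD j 0 := by
  by_cases hm : j ∈ d.keys
  · exact le_of_lt ((h.2 j).mp hm)
  · have hc : d.contains j = false := by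
      cases hb : d.contains j
      · rfl
      · exact absurd ((PySem.Dict.contains_iff_mem_keys d j).mp hb) hm
    rw [PySem.Dict.getD_of_not_contains d 0 hc]

theorem pv_get?_erase (d : PySem.Dict Int Int) (k j : Int) :
    (d.erase k).get? j = if j = k then none else d.get? j := by
  obtain ⟨l⟩ := d
  simp only [PySem.Dict.erase, PySem.Dict.get?, List.find?_filter]
  by_cases hjk : j = k
  · subst hjk
    rw [List.find?_eq_none.mpr ?_]
    · simp
    · intro p _
      simp
  · simp only [if_neg hjk]
    congr 1
    apply congrArg (fun p => List.find? p l)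
    funext p
    by_cases hp : p.1 = j <;> simp [hp, hjk]

theorem pv_keys_erase (d : PySem.Dict Int Int) (k : Int) :
    (d.erase k).keys = d.keys.filter (fun j => !(j == k)) := by
  obtain ⟨l⟩ := d
  simp only [PySem.Dict.erase, PySem.Dict.keys]
  induction l with
  | nil => rfl
  | cons p t ih => by_cases h : p.1 = k <;> simp [h, ih]

theorem pv_getD_erase (d : PySem.Dict Int Int) (k j : Int) :
    (d.erase k).getD j 0 = if j = k then 0 else d.getD j 0 := by
  unfold PySem.Dict.getD
  rw [pv_get?_erase]
  by_cases hjk : j = k <;> simp [hjk]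

theorem pvDec_keys {d : PySem.Dict Int Int} {k : Int} (hk : k ∈ d.keys) :
    (pvDec d k).keys =
      if d.getD k 0 - 1 = 0 then d.keys.filter (fun j => !(j == k)) else d.keys := by
  have hc : d.contains k = true := (PySem.Dict.contains_iff_mem_keys d k).mpr hk
  have hkm : (d.modify k 0 (· - 1)).keys = d.keys := by
    rw [PySem.Dict.keys_modify, PySem.Dict.keys_insert_of_contains d _ hc]
  have hv : (d.modify k 0 (· - 1)).getD k 0 = d.getD k 0 - 1 :=
    PySem.Dict.getD_modify_self d k 0 (· - 1)
  simp only [pvDec]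
  by_cases h0 : d.getD k 0 - 1 = 0
  · rw [if_pos (by rw [hv]; exact beq_iff_eq.mpr h0), if_pos h0, pv_keys_erase, hkm]
  · rw [if_neg (by rw [hv]; simpa using h0), if_neg h0, hkm]

theorem pvDec_getD {d : PySem.Dict Int Int} {k : Int} (hk : k ∈ d.keys) (j : Int) :
    (pvDec d k).getD j 0 = if j = k then d.getD k 0 - 1 else d.getD j 0 := by
  have hc : d.contains k = true := (PySem.Dict.contains_iff_mem_keys d k).mpr hk
  have hv : (d.modify k 0 (· - 1)).getD k 0 = d.getD k 0 - 1 :=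
    PySem.Dict.getD_modify_self d k 0 (· - 1)
  have hm : ∀ i : Int, (d.modify k 0 (· - 1)).getD i 0 = if i = k then d.getD k 0 - 1 else d.getD i 0 :=
    fun i => PySem.Dict.getD_modify d k i 0 (· - 1)
  simp only [pvDec]
  by_cases h0 : d.getD k 0 - 1 = 0
  · rw [if_pos (by rw [hv]; exact beq_iff_eq.mpr h0), pv_getD_erase]
    by_cases hjk : j = k
    · simp [hjk, h0]
    · simp [hjk, hm j]
  · rw [if_neg (by rw [hv]; simpa using h0)]
    exact hm j

theorem pvDec_inv {d : PySem.Dict Int Int} {k : Int} (hI : pvDInv d) (hk : k ∈ d.keys) :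
    pvDInv (pvDec d k) := by
  have hkeq := pvDec_keys (d := d) (k := k) hk
  have hgd := pvDec_getD hk
  have hkpos : 0 < d.getD k 0 := (hI.2 k).mp hk
  constructor
  · rw [hkeq]
    split_ifs with h0
    · exact hI.1.filter _
    · exact hI.1
  · intro j
    rw [hgd j, hkeq]
    by_cases h0 : d.getD k 0 - 1 = 0 <;> by_cases hjk : j = k
    · subst hjk
      simp [h0, List.mem_filter]
    · simp [if_pos h0, List.mem_filter, hjk, hI.2 j]
    · subst hjk
      rw [if_neg h0, if_pos rfl]
      constructor
      · intro _; omega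
      · intro _; exact hk
    · rw [if_neg h0, if_neg hjk]
      exact hI.2 j

theorem pvDec_keys_subset {d : PySem.Dict Int Int} {k : Int} (hk : k ∈ d.keys) :
    (pvDec d k).keys ⊆ d.keys := by
  rw [pvDec_keys hk]
  split_ifs with h0
  · exact fun a ha => (List.mem_filter.mp ha).1
  · exact fun a ha => ha

theorem pvSKeys_pairwise {d : PySem.Dict Int Int} (h : d.keys.Nodup) :
    (pvSKeys d).Pairwise (· < ·) := by
  have hle : (pvSKeys d).Pairwise (fun a b => a ≤ b) :=
    PySem.List.sorted_pairwise d.keys (fun x => x)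
  have hnd : (pvSKeys d).Nodup := ((PySem.List.sorted_perm d.keys (fun x => x) false).nodup_iff).mpr h
  exact (hle.and hnd).imp (fun h => lt_of_le_of_ne h.1 h.2)

theorem pv_mem_sKeys (d : PySem.Dict Int Int) (j : Int) : j ∈ pvSKeys d ↔ j ∈ d.keys :=
  PySem.List.mem_sorted d.keys (fun x => x) false j

-- two strictly increasing lists with the same members are equal
theorem pv_strict_eq {L₁ L₂ : List Int} (h₁ : L₁.Pairwise (· < ·)) (h₂ : L₂.Pairwise (· < ·))
    (h : ∀ j, j ∈ L₁ ↔ j ∈ L₂) : L₁ = L₂ := by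
  have hp : L₁.Perm L₂ :=
    (List.perm_ext_iff_of_nodup (h₁.imp ne_of_lt) (h₂.imp ne_of_lt)).mpr h
  have e1 : PySem.List.sorted L₂ (fun x => x) = L₁ :=
    PySem.List.sorted_eq_of_perm_of_pairwise_lt L₂ L₁ (fun x => x) hp h₁
  have e2 : PySem.List.sorted L₂ (fun x => x) = L₂ :=
    PySem.List.sorted_eq_of_perm_of_pairwise_lt L₂ L₂ (fun x => x) (List.Perm.refl L₂) h₂
  rw [← e1, e2]

theorem pv_drop_bisectRight_eq_filter (xs : List Int) (x : Int)
    (h : xs.Pairwise (fun a b => a ≤ b)) :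
    xs.drop (PySem.List.bisectRight xs x) = xs.filter (fun k => decide (x < k)) := by
  obtain ⟨hle, hbef, haft⟩ := PySem.List.bisectRight_spec xs x h
  set i := PySem.List.bisectRight xs x with hi
  have htake : (xs.take i).filter (fun k => decide (x < k)) = [] := by
    rw [List.filter_eq_nil_iff]
    intro a ha
    obtain ⟨j, hj, rfl⟩ := List.mem_take_iff_getElem.mp ha
    have hjlen : j < xs.length := lt_of_lt_of_le hj (min_le_right _ _)
    have := hbef j hjlen (lt_of_lt_of_le hj (min_le_left _ _))
    simpa using not_lt.mpr this
  have hdrop : (xs.drop i).filter (fun k => decide (x < k)) = xs.drop i := by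
    rw [List.filter_eq_self]
    intro a ha
    obtain ⟨j, hm2, rfl⟩ := List.mem_drop_iff_getElem.mp ha
    have := haft (i + j) (by omega) (by omega)
    simpa using this
  conv_rhs => rw [← List.take_append_drop i xs, List.filter_append, htake, hdrop, List.nil_append]

theorem pvFindCand_eq_head? {d : PySem.Dict Int Int} (hI : pvDInv d) (L : List Int)
    (hL : ∀ k ∈ L, k ∈ d.keys) : pvFindCand d L = L.head? := by
  cases L with
  | nil => rfl
  | cons a t =>
    have ha : 0 < d.getD a 0 := (hI.2 a).mp (hL a (List.mem_cons_self))
    simp [pvFindCand, ha]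

theorem pvInnerA_spec : ∀ (fuel : Nat) (d : PySem.Dict Int Int) (group : List Int) (last : Int),
    pvDInv d →
    ((pvSKeys d).filter (fun k => decide (last < k))).length ≤ fuel →
    ∃ D, pvInnerA fuel d group last
          = (group ++ (pvSKeys d).filter (fun k => decide (last < k)), D)
      ∧ pvDInv D
      ∧ (∀ j, D.getD j 0 = if last < j ∧ 0 < d.getD j 0 then d.getD j 0 - 1 else d.getD j 0)
      ∧ D.keys ⊆ d.keys := by
  intro fuel
  induction fuel with
  | zero =>
    intro d group last hI hlen
    have hnil : (pvSKeys d).filter (fun k => decide (last < k)) = [] := by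
      cases hfe : (pvSKeys d).filter (fun k => decide (last < k)) with
      | nil => rfl
      | cons a t => rw [hfe] at hlen; simp at hlen
    refine ⟨d, ?_, hI, ?_, fun a ha => ha⟩
    · rw [pvInnerA, hnil, List.append_nil]
    · intro j
      rw [if_neg]
      rintro ⟨hlj, hpos⟩
      have hjmem : j ∈ (pvSKeys d).filter (fun k => decide (last < k)) :=
        List.mem_filter.mpr ⟨(pv_mem_sKeys d j).mpr ((hI.2 j).mpr hpos), by simpa using hlj⟩
      rw [hnil] at hjmem
      exact absurd hjmem (List.not_mem_nil)
  | succ fuel ih =>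
    intro d group last hI hlen
    have hsk : PySem.List.sorted d.keys (fun x => x) false = pvSKeys d := rfl
    have hpwlt : (pvSKeys d).Pairwise (· < ·) := pvSKeys_pairwise hI.1
    have hdrop := pv_drop_bisectRight_eq_filter (pvSKeys d) last (hpwlt.imp le_of_lt)
    have hfsub : ∀ k ∈ (pvSKeys d).filter (fun k => decide (last < k)), k ∈ d.keys := by
      intro k hkm
      exact (pv_mem_sKeys d k).mp (List.mem_filter.mp hkm).1
    have hfind : pvFindCand d ((pvSKeys d).drop (PySem.List.bisectRight (pvSKeys d) last))
        = ((pvSKeys d).filter (fun k => decide (last < k))).head? := by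
      rw [hdrop]
      exact pvFindCand_eq_head? hI _ hfsub
    have hfpw : ((pvSKeys d).filter (fun k => decide (last < k))).Pairwise (· < ·) :=
      hpwlt.filter _
    cases hfe : (pvSKeys d).filter (fun k => decide (last < k)) with
    | nil =>
      refine ⟨d, ?_, hI, ?_, fun a ha => ha⟩
      · rw [pvInnerA]
        simp only [hsk]
        rw [hfind, hfe]
        simp
      · intro j
        rw [if_neg]
        rintro ⟨hlj, hpos⟩
        have hjmem : j ∈ (pvSKeys d).filter (fun k => decide (last < k)) :=
          List.mem_filter.mpr ⟨(pv_mem_sKeys d j).mpr ((hI.2 j).mpr hpos), by simpa using hlj⟩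
        rw [hfe] at hjmem
        exact absurd hjmem (List.not_mem_nil)
    | cons k0 rest =>
      have hk0f : k0 ∈ (pvSKeys d).filter (fun k => decide (last < k)) := by
        rw [hfe]; exact List.mem_cons_self
      have hk0s : k0 ∈ pvSKeys d := (List.mem_filter.mp hk0f).1
      have hk0last : last < k0 := by simpa using (List.mem_filter.mp hk0f).2
      have hk0keys : k0 ∈ d.keys := (pv_mem_sKeys d k0).mp hk0s
      have hk0pos : 0 < d.getD k0 0 := (hI.2 k0).mp hk0keys
      have hrestlt : ∀ j ∈ rest, k0 < j := by
        have := hfe ▸ hfpw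
        exact (List.pairwise_cons.mp this).1
      have hI1 : pvDInv (pvDec d k0) := pvDec_inv hI hk0keys
      have hgd1 := pvDec_getD hk0keys
      -- the keys strictly above k0 in the decremented dict are exactly `rest`
      have hrest : (pvSKeys (pvDec d k0)).filter (fun k => decide (k0 < k)) = rest := by
        apply pv_strict_eq ((pvSKeys_pairwise hI1.1).filter _)
        · have := hfe ▸ hfpw
          exact (List.pairwise_cons.mp this).2
        · intro j
          constructor
          · intro hj
            obtain ⟨hjs, hjlt⟩ := List.mem_filter.mp hj
            have hjlt' : k0 < j := by simpa using hjlt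
            have hjpos1 : 0 < (pvDec d k0).getD j 0 := (hI1.2 j).mp ((pv_mem_sKeys _ j).mp hjs)
            rw [hgd1 j, if_neg (by omega)] at hjpos1
            have hjf : j ∈ (pvSKeys d).filter (fun k => decide (last < k)) :=
              List.mem_filter.mpr ⟨(pv_mem_sKeys d j).mpr ((hI.2 j).mpr hjpos1),
                by simp; omega⟩
            rw [hfe] at hjf
            rcases List.mem_cons.mp hjf with h | h
            · omega
            · exact h
          · intro hj
            have hjlt' : k0 < j := hrestlt j hj
            have hjf : j ∈ (pvSKeys d).filter (fun k => decide (last < k)) := by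
              rw [hfe]; exact List.mem_cons_of_mem _ hj
            have hjpos : 0 < d.getD j 0 := (hI.2 j).mp ((pv_mem_sKeys d j).mp (List.mem_filter.mp hjf).1)
            refine List.mem_filter.mpr ⟨(pv_mem_sKeys _ j).mpr ((hI1.2 j).mpr ?_), by simpa using hjlt'⟩
            rw [hgd1 j, if_neg (by omega)]
            exact hjpos
      obtain ⟨D, hrec, hID, hDgd, hDsub⟩ := ih (pvDec d k0) (group ++ [k0]) k0 hI1 (by
        rw [hrest]
        have : ((pvSKeys d).filter (fun k => decide (last < k))).length ≤ fuel + 1 := hlen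
        rw [hfe] at this
        simpa using this)
      refine ⟨D, ?_, hID, ?_, subset_trans hDsub (pvDec_keys_subset hk0keys)⟩
      · rw [pvInnerA]
        simp only [hsk]
        rw [hfind, hfe]
        simp only [List.head?_cons]
        rw [hrec, hrest, List.append_assoc]
        rfl
      · intro j
        rw [hDgd j]
        by_cases hjk : j = k0
        · subst hjk
          rw [hgd1 j, if_pos rfl, if_neg (by omega), if_pos ⟨hk0last, hk0pos⟩]
        · rw [hgd1 j, if_neg hjk]
          by_cases hc : last < j ∧ 0 < d.getD j 0
          · have hjf : j ∈ (pvSKeys d).filter (fun k => decide (last < k)) :=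
              List.mem_filter.mpr ⟨(pv_mem_sKeys d j).mpr ((hI.2 j).mpr hc.2), by simpa using hc.1⟩
            rw [hfe] at hjf
            rcases List.mem_cons.mp hjf with h | h
            · exact absurd h hjk
            · have hk0j : k0 < j := hrestlt j h
              rw [if_pos ⟨hk0j, hc.2⟩, if_pos hc]
          · rw [if_neg hc, if_neg]
            rintro ⟨h1, h2⟩
            exact hc ⟨by omega, h2⟩

theorem pvOuterA_spec : ∀ (fuel : Nat) (d : PySem.Dict Int Int) (acc : List (List Int)) (M : Int)
    (ifuel : Nat), pvDInv d →
    d.keys.length ≤ ifuel →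
    (∀ k ∈ d.keys, d.getD k 0 ≤ M) →
    (M ≠ 0 → ∃ k ∈ d.keys, d.getD k 0 = M) →
    (M = 0 → d.items = []) →
    M.toNat < fuel →
    pvOuterA ifuel fuel d acc
      = acc ++ (PySem.List.pyRange 0 M 1).map
          (fun g => (pvSKeys d).filter (fun v => decide (g < d.getD v 0))) := by
  intro fuel
  induction fuel with
  | zero => intro d acc M ifuel _ _ _ _ _ hf; omega
  | succ fuel ih =>
    intro d acc M ifuel hI hkl h1 h2 h3 hf
    by_cases hsz : d.size = 0
    · have hit : d.items = [] := List.eq_nil_of_length_eq_zero hsz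
      have hM : M = 0 := by
        by_contra hM
        obtain ⟨k, hk, _⟩ := h2 hM
        rw [show d.keys = [] from by simp [PySem.Dict.keys, hit]] at hk
        exact absurd hk (List.not_mem_nil)
      rw [pvOuterA, if_pos (by simpa using hsz), hM]
      simp [PySem.List.pyRange_one_eq_nil le_rfl]
    · have hknil : d.keys ≠ [] := by
        intro h
        apply hsz
        have hit2 : d.items = [] := by simpa [PySem.Dict.keys] using congrArg List.length h
        simp [PySem.Dict.size, hit2]
      have hM0 : M ≠ 0 := fun h => hknil (by simp [PySem.Dict.keys, h3 h])
      have hMpos : 0 < M := by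
        obtain ⟨k, hk, he⟩ := h2 hM0
        have := (hI.2 k).mp hk
        omega
      have hsknil : pvSKeys d ≠ [] :=
        fun h => hknil ((PySem.List.sorted_eq_nil_iff _ _ _).mp h)
      obtain ⟨start, t, hst⟩ := List.exists_cons_of_ne_nil hsknil
      have hstart_mem : start ∈ d.keys := (pv_mem_sKeys d start).mp (hst ▸ List.mem_cons_self)
      have hstart_pos : 0 < d.getD start 0 := (hI.2 start).mp hstart_mem
      have hpwlt : (pvSKeys d).Pairwise (· < ·) := pvSKeys_pairwise hI.1
      have htlt : ∀ j ∈ t, start < j := (List.pairwise_cons.mp (hst ▸ hpwlt)).1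
      have hI1 := pvDec_inv hI hstart_mem
      have hgd1 := pvDec_getD hstart_mem
      have hsub1 := pvDec_keys_subset hstart_mem
      have hmin : ∀ j ∈ d.keys, start ≤ j := by
        intro j hj
        have hjs : j ∈ pvSKeys d := (pv_mem_sKeys d j).mpr hj
        rw [hst] at hjs
        rcases List.mem_cons.mp hjs with h | h
        · omega
        · exact le_of_lt (htlt j h)
      have hlen1 : ((pvSKeys (pvDec d start)).filter (fun k => decide (start < k))).length ≤ ifuel := by
        calc ((pvSKeys (pvDec d start)).filter (fun k => decide (start < k))).length
            ≤ (pvSKeys (pvDec d start)).length := List.length_filter_le _ _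
          _ = (pvDec d start).keys.length := (PySem.List.sorted_perm _ _ _).length_eq
          _ ≤ d.keys.length := (List.subperm_of_subset hI1.1 hsub1).length_le
          _ ≤ ifuel := hkl
      obtain ⟨D, hrec, hID, hDgd, hDsub⟩ := pvInnerA_spec ifuel (pvDec d start) [start] start hI1 hlen1
      have hgrp : (pvSKeys (pvDec d start)).filter (fun k => decide (start < k)) = t := by
        apply pv_strict_eq ((pvSKeys_pairwise hI1.1).filter _) ((List.pairwise_cons.mp (hst ▸ hpwlt)).2)
        intro j
        constructor
        · intro hj
          obtain ⟨hjs, hjlt⟩ := List.mem_filter.mp hj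
          have hjlt' : start < j := by simpa using hjlt
          have hjpos1 : 0 < (pvDec d start).getD j 0 := (hI1.2 j).mp ((pv_mem_sKeys _ j).mp hjs)
          rw [hgd1 j, if_neg (by omega)] at hjpos1
          have hjsd : j ∈ pvSKeys d := (pv_mem_sKeys d j).mpr ((hI.2 j).mpr hjpos1)
          rw [hst] at hjsd
          rcases List.mem_cons.mp hjsd with h | h
          · omega
          · exact h
        · intro hj
          have hjlt' : start < j := htlt j hj
          have hjk : j ∈ d.keys := (pv_mem_sKeys d j).mp (hst ▸ List.mem_cons_of_mem _ hj)
          have hjpos : 0 < d.getD j 0 := (hI.2 j).mp hjk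
          refine List.mem_filter.mpr ⟨(pv_mem_sKeys _ j).mpr ((hI1.2 j).mpr ?_), by simpa using hjlt'⟩
          rw [hgd1 j, if_neg (by omega)]
          exact hjpos
      have hDgd' : ∀ j, D.getD j 0 = if 0 < d.getD j 0 then d.getD j 0 - 1 else d.getD j 0 := by
        intro j
        rw [hDgd j]
        by_cases hjs : j = start
        · subst hjs
          rw [hgd1 j, if_pos rfl, if_neg (by omega), if_pos hstart_pos]
        · rw [hgd1 j, if_neg hjs]
          by_cases hp : 0 < d.getD j 0
          · have : start ≤ j := hmin j ((hI.2 j).mpr hp)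
            rw [if_pos ⟨by omega, hp⟩, if_pos hp]
          · rw [if_neg (fun h => hp h.2), if_neg hp]
      have hres := ih D (acc ++ [start :: t]) (M - 1) ifuel hID
        (by calc D.keys.length
              ≤ (pvDec d start).keys.length := (List.subperm_of_subset hID.1 hDsub).length_le
            _ ≤ d.keys.length := (List.subperm_of_subset hI1.1 hsub1).length_le
            _ ≤ ifuel := hkl)
        (by intro k hk
            have hpos := (hID.2 k).mp hk
            have hdpos : 0 < d.getD k 0 := by
              by_contra h
              rw [hDgd' k, if_neg h] at hpos
              exact h hpos
            have := h1 k ((hI.2 k).mpr hdpos)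
            rw [hDgd' k, if_pos hdpos]
            omega)
        (by intro hM1
            obtain ⟨k, hk, he⟩ := h2 hM0
            have hq : D.getD k 0 = M - 1 := by
              rw [hDgd' k, if_pos ((hI.2 k).mp hk), he]
            exact ⟨k, (hID.2 k).mpr (by rw [hq]; omega), hq⟩)
        (by intro hM1
            have hkeys : D.keys = [] := by
              cases hD : D.keys with
              | nil => rfl
              | cons a s =>
                have ha : a ∈ D.keys := hD ▸ List.mem_cons_self
                have hpos := (hID.2 a).mp ha
                have hdpos : 0 < d.getD a 0 := by
                  by_contra h
                  rw [hDgd' a, if_neg h] at hpos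
                  exact h hpos
                have := h1 a ((hI.2 a).mpr hdpos)
                rw [hDgd' a, if_pos hdpos] at hpos
                omega
            exact List.map_eq_nil_iff.mp hkeys)
        (by omega)
      have hcombine : (PySem.List.pyRange 0 M 1).map
            (fun g => (pvSKeys d).filter (fun v => decide (g < d.getD v 0)))
          = (start :: t) :: (PySem.List.pyRange 0 (M - 1) 1).map
            (fun g => (pvSKeys D).filter (fun v => decide (g < D.getD v 0))) := by
        rw [PySem.List.pyRange_one_cons hMpos, List.map_cons]
        congr 1
        · rw [← hst]
          rw [List.filter_eq_self.mpr]
          intro a ha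
          simpa using (hI.2 a).mp ((pv_mem_sKeys d a).mp ha)
        · have h01 : (0 : Int) + 1 = 1 := by norm_num
          rw [h01, PySem.List.pyRange_one 1 M, PySem.List.pyRange_one 0 (M - 1), List.map_map, List.map_map]
          have hMM : (M - 1 - 0).toNat = (M - 1).toNat := by norm_num
          rw [hMM]
          apply List.map_congr_left
          intro k _
          simp only [Function.comp]
          apply pv_strict_eq (hpwlt.filter _) ((pvSKeys_pairwise hID.1).filter _)
          intro j
          have hnn : 0 ≤ d.getD j 0 := pvDInv_getD_nonneg hI j
          constructor
          · intro hj
            obtain ⟨hjs, hjlt⟩ := List.mem_filter.mp hj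
            have hjlt' : 1 + (k : Int) < d.getD j 0 := by simpa using hjlt
            have hDj : D.getD j 0 = d.getD j 0 - 1 := by
              rw [hDgd' j, if_pos (by omega)]
            refine List.mem_filter.mpr ⟨(pv_mem_sKeys _ j).mpr ((hID.2 j).mpr ?_), ?_⟩
            · rw [hDj]; omega
            · rw [hDj]; simp; omega
          · intro hj
            obtain ⟨hjs, hjlt⟩ := List.mem_filter.mp hj
            have hjpos : 0 < D.getD j 0 := (hID.2 j).mp ((pv_mem_sKeys _ j).mp hjs)
            have hdpos : 0 < d.getD j 0 := by
              by_contra h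
              rw [hDgd' j, if_neg h] at hjpos
              exact h hjpos
            have hDj : D.getD j 0 = d.getD j 0 - 1 := by
              rw [hDgd' j, if_pos hdpos]
            have hjlt' : 0 + (k : Int) < D.getD j 0 := by simpa using hjlt
            refine List.mem_filter.mpr ⟨(pv_mem_sKeys d j).mpr ((hI.2 j).mpr hdpos), ?_⟩
            simp
            omega
      have hsk : PySem.List.sorted d.keys (fun x => x) false = pvSKeys d := rfl
      conv_rhs => rw [hcombine]
      rw [pvOuterA, if_neg (by simpa using hsz), hsk, hst]
      simp only [hrec]
      rw [hgrp]
      have hcons : ([start] ++ t : List Int) = start :: t := rfl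
      rw [hcons, hres]
      simp [List.append_assoc]

-- ===== VERDICT (by name: the statement is the Claim_ definition above) =====
theorem group_unique_sorted_integers_spec : Claim_equal_group_unique_sorted_integers := by
  intro nums _
  unfold Spec_group_unique_sorted_integers
  by_cases hnil : nums = []
  · subst hnil
    rfl
  · unfold group_unique_sorted_integers group_unique_sorted_integers_alt
    rw [if_neg (by simpa using hnil)]
    have hI : pvDInv (PySem.Dict.counter nums) := by
      refine ⟨PySem.Dict.nodup_keys_counter nums, ?_⟩
      intro j
      rw [PySem.Dict.getD_counter, PySem.Dict.keys_counter, PySem.Set.mem_ofList]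
      constructor
      · intro h
        exact_mod_cast List.count_pos_iff.mpr h
      · intro h
        exact List.count_pos_iff.mp (by exact_mod_cast h)
    have hkeysub : (PySem.Dict.counter nums).keys ⊆ nums := by
      intro a ha
      rw [PySem.Dict.keys_counter] at ha
      exact (PySem.Set.mem_ofList nums a).mp ha
    have hklen : (PySem.Dict.counter nums).keys.length ≤ nums.length :=
      (List.subperm_of_subset hI.1 hkeysub).length_le
    have hknil : (PySem.Dict.counter nums).keys ≠ [] := by
      intro h
      rw [PySem.Dict.keys_counter] at h
      obtain ⟨x, xs, rfl⟩ := List.exists_cons_of_ne_nil hnil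
      have : x ∈ PySem.Set.ofList (x :: xs) := (PySem.Set.mem_ofList _ x).mpr List.mem_cons_self
      rw [h] at this
      exact absurd this (List.not_mem_nil)
    have hvals : (PySem.Dict.counter nums).values
        = (PySem.Dict.counter nums).keys.map (fun k => (PySem.Dict.counter nums).getD k 0) :=
      PySem.Dict.values_eq_map_keys _ hI.1 0
    have hvnil : (PySem.Dict.counter nums).values ≠ [] := by
      rw [hvals]
      simpa using hknil
    have hWmem : PySem.List.maxD (PySem.Dict.counter nums).values (fun x => x) 0
        ∈ (PySem.Dict.counter nums).values := PySem.List.maxD_mem _ _ _ hvnil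
    have hWmem' : PySem.List.maxD (PySem.Dict.counter nums).values (fun x => x) 0
        ∈ (PySem.Dict.counter nums).keys.map (fun k => (PySem.Dict.counter nums).getD k 0) := by
      rw [← hvals]
      exact hWmem
    obtain ⟨kW, hkW, hkWe⟩ := List.mem_map.mp hWmem' 
    have hWle : ∀ y ∈ (PySem.Dict.counter nums).values,
        y ≤ PySem.List.maxD (PySem.Dict.counter nums).values (fun x => x) 0 := by
      intro y hy
      cases hmx : PySem.List.max? (PySem.Dict.counter nums).values (fun x => x) with
      | none => exact absurd ((PySem.List.max?_eq_none_iff _ _).mp hmx) hvnil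
      | some m =>
        have := PySem.List.max?_isMax hmx y hy
        simpa [PySem.List.maxD, hmx] using this
    have h1 : ∀ k ∈ (PySem.Dict.counter nums).keys, (PySem.Dict.counter nums).getD k 0
        ≤ PySem.List.maxD (PySem.Dict.counter nums).values (fun x => x) 0 := by
      intro k hk
      exact hWle _ (by rw [hvals]; exact List.mem_map.mpr ⟨k, hk, rfl⟩)
    have h2 : PySem.List.maxD (PySem.Dict.counter nums).values (fun x => x) 0 ≠ 0 →
        ∃ k ∈ (PySem.Dict.counter nums).keys, (PySem.Dict.counter nums).getD k 0
          = PySem.List.maxD (PySem.Dict.counter nums).values (fun x => x) 0 :=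
      fun _ => ⟨kW, hkW, hkWe⟩
    have h3 : PySem.List.maxD (PySem.Dict.counter nums).values (fun x => x) 0 = 0 →
        (PySem.Dict.counter nums).items = [] := by
      intro h0
      exfalso
      have := (hI.2 kW).mp hkW
      rw [hkWe] at this
      omega
    have hfuel : (PySem.List.maxD (PySem.Dict.counter nums).values (fun x => x) 0).toNat
        < nums.length + 1 := by
      have hcnt : (PySem.Dict.counter nums).getD kW 0 = (nums.count kW : Int) :=
        PySem.Dict.getD_counter nums kW
      have hcl : nums.count kW ≤ nums.length := List.count_le_length
      rw [hcnt] at hkWe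
      omega
    rw [pvOuterA_spec (nums.length + 1) (PySem.Dict.counter nums) []
      (PySem.List.maxD (PySem.Dict.counter nums).values (fun x => x) 0) nums.length
      hI hklen h1 h2 h3 hfuel]
    rfl
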